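-- pv_equiv track=rewrite | github.com/ynsa/py_course | seminar_1/thue_morse.py | get_true_morse_k_bin
-- ===== SOURCE A (Python) =====
-- def get_nearest_power(number):
--     power = 1
--     while power < number:
--         power += 8
--     return power - 2 if power > 2 else 1
--
-- def get_true_morse_k_bin(k, value):
--     if not k:
--         return value
--     else:
--         value = get_true_morse_k_bin(k - 1, value)
--         new_value = (~value & get_nearest_power(value))
--         move = pow(2, k - 1)
--         res = value + (new_value << move)
--         return res
-- ===== SOURCE B (Python) =====
-- def get_true_morse_k_bin(k, value):
--     for i in range(k):
--         m = 1 if value <= 1 else 8 * ((value - 2) // 8) + 7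
--         value += (~value & m) << (2 ** i)
--     return value
-- ===== Notes on version B (the rewrite author's own statement) =====
-- stated objective: alternative
-- what changed: Recursion replaced by an iterative left-to-right loop, and get_nearest_power's increment-by-8 search loop replaced by a closed-form floor-division formula (1 if value<=1 else 8*((value-2)//8)+7); intended as faster (O(k) arithmetic ops vs O(value/8) loop steps per level) but unconfirmed in a timing run since the result's own size dominates on large inputs.
import Mathlib
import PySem

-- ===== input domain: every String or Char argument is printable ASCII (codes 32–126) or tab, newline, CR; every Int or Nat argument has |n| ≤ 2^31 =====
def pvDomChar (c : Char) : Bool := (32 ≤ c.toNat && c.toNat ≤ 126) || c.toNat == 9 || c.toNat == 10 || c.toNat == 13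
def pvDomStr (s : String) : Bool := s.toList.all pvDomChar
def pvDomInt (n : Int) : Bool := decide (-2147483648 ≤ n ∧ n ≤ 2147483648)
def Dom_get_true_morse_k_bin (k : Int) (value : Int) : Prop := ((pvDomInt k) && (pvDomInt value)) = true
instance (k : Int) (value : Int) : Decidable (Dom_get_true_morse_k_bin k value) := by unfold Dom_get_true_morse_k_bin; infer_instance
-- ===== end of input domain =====

-- B replaces A's recursion with a left-to-right loop and A's increment-by-8 search
-- for the nearest 1+8m bound with a closed-form floor-division formula.

-- ===== PORT A =====
-- hand-written exact port of Python's 'x << n' (x * 2^n); like CPython/GMP it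
-- short-circuits x = 0 so that '0 << huge' is cheap (the value is x * 2^n in every case)
def pyShl (x : Int) (n : Nat) : Int :=
  if x = 0 then 0 else x * 2 ^ n

-- while power < number: power += 8
def nearestLoop (number : Int) (power : Int) : Int :=
  if power < number then nearestLoop number (power + 8) else power
termination_by (number - power).toNat
decreasing_by omega

def get_nearest_power (number : Int) : Int :=
  let power := nearestLoop number 1
  if power > 2 then power - 2 else 1

def get_true_morse_k_bin (k : Int) (value : Int) : Int :=
  if k = 0 then value
  else if k < 0 then 0   -- Python never returns here (unbounded recursion → RecursionError); outside Pre_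
  else
    let value := get_true_morse_k_bin (k - 1) value
    let new_value := Int.land (-value - 1) (get_nearest_power value)   -- ~value & …
    -- move = pow(2, k-1) ≥ 0; res = value + (new_value << move)
    value + pyShl new_value (2 ^ (k - 1).toNat)
termination_by k.toNat
decreasing_by omega

-- ===== PORT B =====
def get_true_morse_k_bin_alt (k : Int) (value : Int) : Int :=
  (List.range k.toNat).foldl
    (fun value i =>
      let m : Int := if value ≤ 1 then 1 else 8 * PySem.Int.floordiv (value - 2) 8 + 7
      value + pyShl (Int.land (-value - 1) m) (2 ^ i))
    value

-- ===== PRECONDITION & SPEC =====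
-- Pre_ excludes k < 0, where A recurses without a base case and raises RecursionError.
def Pre_get_true_morse_k_bin (k : Int) (value : Int) : Prop := 0 ≤ k
instance (k : Int) (value : Int) : Decidable (Pre_get_true_morse_k_bin k value) := by unfold Pre_get_true_morse_k_bin; infer_instance
def pvWitness_get_true_morse_k_bin : Int × Int := (3, 5)

def Spec_get_true_morse_k_bin (k : Int) (value : Int) (out : Int) : Prop := out = get_true_morse_k_bin_alt k value
instance (k : Int) (value : Int) (out : Int) : Decidable (Spec_get_true_morse_k_bin k value out) := by unfold Spec_get_true_morse_k_bin; infer_instance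

-- ===== CLAIM (what is proved, stated in full; the proofs are below) =====
def Claim_equal_get_true_morse_k_bin : Prop := ∀ (k : Int) (value : Int), Dom_get_true_morse_k_bin k value → Pre_get_true_morse_k_bin k value → Spec_get_true_morse_k_bin k value (get_true_morse_k_bin k value)

-- ===== LEMMAS AND PROOFS =====

lemma nearestLoop_eq_aux (number : Int) : ∀ (d : Nat) (power : Int), (number - power).toNat ≤ d →
    nearestLoop number power = power + 8 * (((number - power).toNat + 7) / 8 : Nat) := by
  intro d
  induction d with
  | zero =>
      intro power h
      rw [nearestLoop, if_neg (by omega)]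
      omega
  | succ d ih =>
      intro power h
      by_cases hp : power < number
      · rw [nearestLoop, if_pos hp, ih (power + 8) (by omega)]
        omega
      · rw [nearestLoop, if_neg hp]
        omega

lemma nearestLoop_eq (number power : Int) :
    nearestLoop number power = power + 8 * (((number - power).toNat + 7) / 8 : Nat) :=
  nearestLoop_eq_aux number (number - power).toNat power le_rfl

lemma get_nearest_power_eq (v : Int) :
    get_nearest_power v = if v ≤ 1 then 1 else 8 * PySem.Int.floordiv (v - 2) 8 + 7 := by
  rw [PySem.Int.floordiv_eq_ediv_of_pos (a := v - 2) (b := 8) (by omega)]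
  simp only [get_nearest_power, nearestLoop_eq, gt_iff_lt]
  split_ifs <;> omega

lemma get_true_morse_main (n : Nat) (value : Int) :
    get_true_morse_k_bin (n : Int) value = get_true_morse_k_bin_alt (n : Int) value := by
  induction n with
  | zero => rw [get_true_morse_k_bin]; simp [get_true_morse_k_bin_alt]
  | succ n ih =>
      rw [get_true_morse_k_bin]
      have h0 : ¬ ((n + 1 : Nat) : Int) = 0 := by omega
      have h1 : ¬ ((n + 1 : Nat) : Int) < 0 := by omega
      rw [if_neg h0, if_neg h1]
      have h2 : ((n + 1 : Nat) : Int) - 1 = (n : Int) := by omega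
      rw [h2, Int.toNat_natCast, ih]
      unfold get_true_morse_k_bin_alt
      have h4 : ((n + 1 : Nat) : Int).toNat = n + 1 := by omega
      have h5 : ((n : Nat) : Int).toNat = n := by omega
      rw [h4, h5, List.range_succ, List.foldl_append]
      simp only [List.foldl_cons, List.foldl_nil]
      rw [get_nearest_power_eq]

-- ===== VERDICT (by name: the statement is the Claim_ definition above) =====
theorem get_true_morse_k_bin_spec : Claim_equal_get_true_morse_k_bin := by
  intro k value _ hpre
  unfold Spec_get_true_morse_k_bin
  have hk : k = ((k.toNat : Nat) : Int) := by
    unfold Pre_get_true_morse_k_bin at hpre; omega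
  rw [hk]
  exact get_true_morse_main k.toNat value
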